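-- pv_equiv track=rewrite | github.com/andrewgbliss/tom-gobbler | scripts/py/godot_sync.py | find_section_bounds
-- ===== SOURCE A (Python) =====
-- def find_section_bounds(text: str, section_name: str):
--     """
--     Find the start/end indices of a [section_name] block in a Godot project.godot-like file.
--     Returns (start_idx, end_idx) or (None, None) if not found.
--     """
--     lines = text.splitlines(keepends=True)
--     start_idx = None
--     end_idx = None
--
--     header = f"[{section_name}]"
--
--     line_start = None
--     for i, line in enumerate(lines):
--         if line.strip() == header:
--             line_start = i
--             break
--
--     if line_start is None:
--         return None, None
--
--     start_idx = sum(len(l) for l in lines[:line_start])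
--
--     line_end = len(lines)
--     for i in range(line_start + 1, len(lines)):
--         stripped = lines[i].lstrip()
--         if stripped.startswith("[") and "]" in stripped:
--             line_end = i
--             break
--
--     end_idx = sum(len(l) for l in lines[:line_end])
--     return start_idx, end_idx
-- ===== SOURCE B (Python) =====
-- def find_section_bounds(text: str, section_name: str):
--     """Single accumulating pass over the keepends lines, tracking a running char offset."""
--     header = f"[{section_name}]"
--     start = None
--     offset = 0
--     for line in text.splitlines(keepends=True):
--         if start is None:
--             if line.strip() == header:
--                 start = offset
--         else:
--             stripped = line.lstrip()
--             if stripped.startswith("[") and "]" in stripped: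
--                 return start, offset
--         offset += len(line)
--     if start is None:
--         return None, None
--     return start, offset
-- ===== Notes on version B (the rewrite author's own statement) =====
-- stated objective: simpler
-- what changed: A makes four passes over the line list (find the header index, sum prefix lengths, find the next-section index, sum prefix lengths again); B is a single pass over the keepends lines maintaining a running char offset, setting start at the header line and returning at the next section header or at the end.
import Mathlib
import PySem

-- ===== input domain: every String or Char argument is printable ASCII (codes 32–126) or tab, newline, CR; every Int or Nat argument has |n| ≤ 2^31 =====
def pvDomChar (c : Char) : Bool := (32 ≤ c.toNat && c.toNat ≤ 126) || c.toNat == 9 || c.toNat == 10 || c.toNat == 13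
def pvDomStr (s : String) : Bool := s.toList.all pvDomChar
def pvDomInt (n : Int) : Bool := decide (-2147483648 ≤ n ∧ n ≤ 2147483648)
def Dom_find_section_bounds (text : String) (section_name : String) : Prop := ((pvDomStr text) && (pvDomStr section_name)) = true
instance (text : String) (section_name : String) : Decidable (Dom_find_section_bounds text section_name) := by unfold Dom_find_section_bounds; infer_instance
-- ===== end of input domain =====

-- B replaces A's four passes (find header index, sum prefix lengths, find next-section index,
-- sum prefix lengths again) by ONE accumulating pass maintaining a running char offset; return values agree everywhere.

-- shared tokenizer: str.splitlines(keepends=True), exact on the Dom alphabet (line breaks there are '\n', '\r', '\r\n')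
def pvSplitKeepGo (acc : List Char) : List Char → List (List Char)
  | [] => if acc.isEmpty then [] else [acc.reverse]
  | c :: rest =>
    if c = '\n' then (acc.reverse ++ ['\n']) :: pvSplitKeepGo [] rest
    else if c = '\r' then
      if rest.head? = some '\n' then (acc.reverse ++ ['\r', '\n']) :: pvSplitKeepGo [] rest.tail
      else (acc.reverse ++ ['\r']) :: pvSplitKeepGo [] rest
    else pvSplitKeepGo (c :: acc) rest
  termination_by l => l.length
  decreasing_by all_goals (simp [List.length_tail]; try omega)

def pvSplitKeep (s : List Char) : List (List Char) := pvSplitKeepGo [] s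

-- the two line tests, shared because A's and B's Python use the identical expressions
def pvIsHeader (header line : List Char) : Bool := PySem.Chars.strip line == header
def pvIsSection (line : List Char) : Bool :=
  let stripped := PySem.Chars.lstrip line
  PySem.Chars.startswith stripped ['['] && PySem.Chars.isIn [']'] stripped

-- ===== PORT A =====
-- first loop: 'for i, line in enumerate(lines): if line.strip() == header: line_start = i; break'
def pvAFindHdr (header : List Char) (i : Nat) : List (List Char) → Option Nat
  | [] => none
  | l :: rest => if pvIsHeader header l then some i else pvAFindHdr header (i + 1) rest

-- second loop: 'for i in range(line_start+1, len(lines)): …' (ported by walking lines.drop (line_start+1) with the index counter)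
def pvAFindEnd (i : Nat) : List (List Char) → Option Nat
  | [] => none
  | l :: rest => if pvIsSection l then some i else pvAFindEnd (i + 1) rest

def pvSumLen (ls : List (List Char)) : Int := (ls.map (fun l => (l.length : Int))).sum

def find_section_bounds (text : String) (section_name : String) : Option Int × Option Int :=
  let lines := pvSplitKeep text.toList
  let header : List Char := '[' :: (section_name.toList ++ [']'])
  match pvAFindHdr header 0 lines with
  | none => (none, none)
  | some line_start =>
    let start_idx := pvSumLen (lines.take line_start)      -- sum(len(l) for l in lines[:line_start])
    let line_end :=
      match pvAFindEnd (line_start + 1) (lines.drop (line_start + 1)) with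
      | some j => j
      | none => lines.length
    let end_idx := pvSumLen (lines.take line_end)
    (some start_idx, some end_idx)

-- ===== PORT B =====
-- phase 2 of the single pass: header already seen, keep adding lengths until the next section header (or the end)
def pvBEnd (offset : Int) : List (List Char) → Int
  | [] => offset
  | l :: rest => if pvIsSection l then offset else pvBEnd (offset + l.length) rest

-- phase 1: scan for the header line, maintaining the running char offset
def pvBScan (header : List Char) (offset : Int) : List (List Char) → Option Int × Option Int
  | [] => (none, none)
  | l :: rest =>
    if pvIsHeader header l then (some offset, some (pvBEnd (offset + l.length) rest))
    else pvBScan header (offset + l.length) rest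

def find_section_bounds_alt (text : String) (section_name : String) : Option Int × Option Int :=
  pvBScan ('[' :: (section_name.toList ++ [']'])) 0 (pvSplitKeep text.toList)

-- ===== PRECONDITION & SPEC =====
def Spec_find_section_bounds (text : String) (section_name : String) (out : Option Int × Option Int) : Prop := out = find_section_bounds_alt text section_name
instance (text : String) (section_name : String) (out : Option Int × Option Int) : Decidable (Spec_find_section_bounds text section_name out) := by unfold Spec_find_section_bounds; infer_instance

-- ===== CLAIM (what is proved, stated in full; the proofs are below) =====
def Claim_equal_find_section_bounds : Prop := ∀ (text : String) (section_name : String), Dom_find_section_bounds text section_name → Spec_find_section_bounds text section_name (find_section_bounds text section_name)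

-- ===== LEMMAS AND PROOFS =====

theorem pvSumLen_nil : pvSumLen [] = 0 := rfl

theorem pvSumLen_cons (l : List Char) (ls : List (List Char)) :
    pvSumLen (l :: ls) = l.length + pvSumLen ls := by simp [pvSumLen]

theorem pvSumLen_append (a b : List (List Char)) :
    pvSumLen (a ++ b) = pvSumLen a + pvSumLen b := by simp [pvSumLen]

theorem take_length_takeWhile {α : Type} (p : α → Bool) (l : List α) :
    l.take (l.takeWhile p).length = l.takeWhile p := by
  induction l with
  | nil => rfl
  | cons x xs ih =>
    by_cases h : p x <;> simp [h, ih]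

theorem pvAFindHdr_shift (header : List Char) (i : Nat) (ls : List (List Char)) :
    pvAFindHdr header i ls = (pvAFindHdr header 0 ls).map (· + i) := by
  induction ls generalizing i with
  | nil => simp [pvAFindHdr]
  | cons l rest ih =>
    simp only [pvAFindHdr]
    by_cases h : pvIsHeader header l
    · simp [h]
    · rw [if_neg h, if_neg h, ih (i + 1), ih 1, Option.map_map]
      cases pvAFindHdr header 0 rest
      · simp
      · simp; omega

theorem pvAFindHdr_cons (header l : List Char) (rest : List (List Char)) :
    pvAFindHdr header 0 (l :: rest) =
      if pvIsHeader header l then some 0 else (pvAFindHdr header 0 rest).map (· + 1) := by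
  simp only [pvAFindHdr]
  rw [pvAFindHdr_shift header 1 rest]

theorem pvAFindHdr_lt_length (header : List Char) (ls : List (List Char)) (k : Nat)
    (h : pvAFindHdr header 0 ls = some k) : k < ls.length := by
  induction ls generalizing k with
  | nil => simp [pvAFindHdr] at h
  | cons l rest ih =>
    rw [pvAFindHdr_cons] at h
    by_cases hl : pvIsHeader header l
    · rw [if_pos hl] at h
      injection h with h
      simp [← h]
    · rw [if_neg hl] at h
      cases hr : pvAFindHdr header 0 rest with
      | none => rw [hr] at h; simp at h
      | some k' =>
        rw [hr] at h; simp at h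
        have := ih k' hr
        simp; omega

-- A's second loop, in closed form: first section index, or i + length if none
theorem pvAFindEnd_closed (i : Nat) (ls : List (List Char)) :
    (match pvAFindEnd i ls with | some j => j | none => i + ls.length) =
      i + (ls.takeWhile (fun l => ! pvIsSection l)).length := by
  induction ls generalizing i with
  | nil => simp [pvAFindEnd]
  | cons l rest ih =>
    simp only [pvAFindEnd]
    by_cases h : pvIsSection l
    · simp [h]
    · rw [if_neg h]
      simp only [List.takeWhile_cons, h]
      have := ih (i + 1)
      simp only [List.length_cons]
      cases hfe : pvAFindEnd (i + 1) rest
      · rw [hfe] at this; simp at this ⊢; omega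
      · rw [hfe] at this; simp at this ⊢; omega

-- B's phase 2 in the same closed form
theorem pvBEnd_eq (offset : Int) (ls : List (List Char)) :
    pvBEnd offset ls = offset + pvSumLen (ls.takeWhile (fun l => ! pvIsSection l)) := by
  induction ls generalizing offset with
  | nil => simp [pvBEnd, pvSumLen]
  | cons l rest ih =>
    simp only [pvBEnd]
    by_cases h : pvIsSection l
    · simp [h, pvSumLen]
    · rw [if_neg h, ih]
      simp [h, pvSumLen_cons, add_assoc]

-- B's single pass equals A's multi-pass closed form, relative to the accumulated offset
theorem pvBScan_eq (header : List Char) (offset : Int) (ls : List (List Char)) :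
    pvBScan header offset ls =
      match pvAFindHdr header 0 ls with
      | none => (none, none)
      | some k =>
        (some (offset + pvSumLen (ls.take k)),
         some (offset + pvSumLen (ls.take (k + 1)) +
           pvSumLen ((ls.drop (k + 1)).takeWhile (fun l => ! pvIsSection l)))) := by
  induction ls generalizing offset with
  | nil => simp [pvBScan, pvAFindHdr]
  | cons l rest ih =>
    rw [pvAFindHdr_cons]
    simp only [pvBScan]
    by_cases h : pvIsHeader header l
    · rw [if_pos h, if_pos h, pvBEnd_eq]
      simp [pvSumLen_cons, pvSumLen_nil]
    · rw [if_neg h, if_neg h, ih]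
      cases hfh : pvAFindHdr header 0 rest with
      | none => simp
      | some k =>
        simp only [Option.map_some, List.take_succ_cons, List.drop_succ_cons, pvSumLen_cons]
        simp [add_assoc]

-- A's whole multi-pass body equals B's single pass, for any lines list
theorem pvAB_core (ls : List (List Char)) (header : List Char) :
    (match pvAFindHdr header 0 ls with
     | none => ((none : Option Int), (none : Option Int))
     | some line_start =>
       let start_idx := pvSumLen (ls.take line_start)
       let line_end :=
         match pvAFindEnd (line_start + 1) (ls.drop (line_start + 1)) with
         | some j => j
         | none => ls.length
       let end_idx := pvSumLen (ls.take line_end)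
       (some start_idx, some end_idx)) = pvBScan header 0 ls := by
  rw [pvBScan_eq]
  cases hk : pvAFindHdr header 0 ls with
  | none => rfl
  | some k =>
    simp only
    have hlt := pvAFindHdr_lt_length header ls k hk
    have hlen : ls.length = (k + 1) + (ls.drop (k + 1)).length := by
      simp [List.length_drop]; omega
    rw [hlen, pvAFindEnd_closed, List.take_add, pvSumLen_append, take_length_takeWhile]
    simp

-- ===== VERDICT (by name: the statement is the Claim_ definition above) =====
theorem find_section_bounds_spec : Claim_equal_find_section_bounds := by
  intro text section_name _
  show find_section_bounds text section_name = find_section_bounds_alt text section_name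
  exact pvAB_core (pvSplitKeep text.toList) ('[' :: (section_name.toList ++ [']']))
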